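-- pv_equiv track=rewrite | github.com/zachdrouin/sss-image-categorizer | app/image_categorizer.py | post_process_people_categories
-- ===== SOURCE A (Python) =====
-- from typing import List, Set
--
-- def post_process_people_categories(categories: List[str], description: str = None) -> List[str]:
--     """
--     Post-process people categories to ensure we have appropriate specific categories
--     based on the image analysis and description
--     """
--     # Check if we already have people categories
--     has_people = any(cat.startswith('PEOPLE >') for cat in categories)
--     has_ethnicity = any('Ethnicity >' in cat for cat in categories)
--     has_age = any('Age >' in cat and not cat.endswith('Any Age') for cat in categories)
--     has_people_count = any(cat in ['PEOPLE > Any People > 2 People', 'PEOPLE > Any People > 3+ People'] for cat in categories)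
--
--     # If we have people but no ethnicity, try to infer from description
--     if has_people and not has_ethnicity and description:
--         description = description.lower()
--         if 'asian' in description:
--             categories.append('PEOPLE > Any Ethnicity > Asian')
--         elif 'black' in description or 'african' in description:
--             categories.append('PEOPLE > Any Ethnicity > Black / African American')
--         elif 'hispanic' in description or 'latina' in description or 'latino' in description:
--             categories.append('PEOPLE > Any Ethnicity > Hispanic / Latina/o')
--         elif 'indigenous' in description or 'native american' in description:
--             categories.append('PEOPLE > Any Ethnicity > Indigenous / Native American')
--         elif 'white' in description or 'caucasian' in description:
--             categories.append('PEOPLE > Any Ethnicity > White / Caucasian')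
--         else:
--             # Default to generic ethnicity if we can't determine
--             categories.append('PEOPLE > Any Ethnicity')
--
--     # If we have people but no age range, try to infer from description
--     if has_people and not has_age and description:
--         description = description.lower()
--         if 'child' in description or 'kid' in description or 'young' in description or 'teen' in description:
--             categories.append('PEOPLE > Any Age > < 20')
--         elif '20s' in description or 'twenties' in description or 'young adult' in description:
--             categories.append('PEOPLE > Any Age > 20s')
--         elif '30s' in description or 'thirties' in description:
--             categories.append('PEOPLE > Any Age > 30s')
--         elif '40s' in description or 'forties' in description:
--             categories.append('PEOPLE > Any Age > 40s')
--         elif '50s' in description or 'fifties' in description: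
--             categories.append('PEOPLE > Any Age > 50s')
--         elif '60' in description or 'sixties' in description or 'senior' in description or 'elderly' in description:
--             categories.append('PEOPLE > Any Age > 60+')
--         else:
--             # If we can't determine, add the generic age category
--             categories.append('PEOPLE > Any Age')
--
--     # If we have people but no count, default to single person
--     if has_people and not has_people_count and 'PEOPLE > No People' not in categories:
--         # Check description for multiple people
--         if description and ('people' in description.lower() or 'persons' in description.lower() or 'group' in description.lower()):
--             if 'three' in description.lower() or 'multiple' in description.lower() or 'group' in description.lower():
--                 categories.append('PEOPLE > Any People > 3+ People')
--             elif 'two' in description.lower() or 'couple' in description.lower() or 'pair' in description.lower():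
--                 categories.append('PEOPLE > Any People > 2 People')
--             else:
--                 categories.append('PEOPLE > Any People')
--         else:
--             categories.append('PEOPLE > Any People')
--
--     return list(dict.fromkeys(categories))  # Remove duplicates while preserving order
-- ===== SOURCE B (Python) =====
-- # Different decomposition: ONE pass over `categories` accumulates all five flags
-- # (A rescans the list four times with any() plus a membership test), the chosen
-- # category per section is "filter matching rules, take head" over a keyword table
-- # (A hard-codes if/elif chains), the additions are collected in a separate list
-- # concatenated once, and dedup is an explicit seen-set loop (A: dict.fromkeys).
-- # Equivalence is about the return value only (A mutates `categories` in place).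
--
-- ETHNICITY = [
--     (('asian',), 'PEOPLE > Any Ethnicity > Asian'),
--     (('black', 'african'), 'PEOPLE > Any Ethnicity > Black / African American'),
--     (('hispanic', 'latina', 'latino'), 'PEOPLE > Any Ethnicity > Hispanic / Latina/o'),
--     (('indigenous', 'native american'), 'PEOPLE > Any Ethnicity > Indigenous / Native American'),
--     (('white', 'caucasian'), 'PEOPLE > Any Ethnicity > White / Caucasian'),
-- ]
--
-- AGE = [
--     (('child', 'kid', 'young', 'teen'), 'PEOPLE > Any Age > < 20'),
--     (('20s', 'twenties', 'young adult'), 'PEOPLE > Any Age > 20s'),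
--     (('30s', 'thirties'), 'PEOPLE > Any Age > 30s'),
--     (('40s', 'forties'), 'PEOPLE > Any Age > 40s'),
--     (('50s', 'fifties'), 'PEOPLE > Any Age > 50s'),
--     (('60', 'sixties', 'senior', 'elderly'), 'PEOPLE > Any Age > 60+'),
-- ]
--
-- COUNT = [
--     (('three', 'multiple', 'group'), 'PEOPLE > Any People > 3+ People'),
--     (('two', 'couple', 'pair'), 'PEOPLE > Any People > 2 People'),
-- ]
--
--
-- def _pick(table, text, default):
--     matches = [cat for kws, cat in table if any(k in text for k in kws)]
--     return matches[0] if matches else default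
--
--
-- def post_process_people_categories(categories, description=None):
--     d = (description or '').lower()
--
--     # single pass over categories for all five facts
--     people = ethnicity = age = count = no_people = False
--     for c in categories:
--         people = people or c.startswith('PEOPLE >')
--         ethnicity = ethnicity or 'Ethnicity >' in c
--         age = age or ('Age >' in c and not c.endswith('Any Age'))
--         count = count or c in ('PEOPLE > Any People > 2 People',
--                                'PEOPLE > Any People > 3+ People')
--         no_people = no_people or c == 'PEOPLE > No People'
--
--     additions = []
--     if people and not ethnicity and d:
--         additions.append(_pick(ETHNICITY, d, 'PEOPLE > Any Ethnicity'))
--     if people and not age and d: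
--         additions.append(_pick(AGE, d, 'PEOPLE > Any Age'))
--     if people and not count and not no_people:
--         if d and any(w in d for w in ('people', 'persons', 'group')):
--             additions.append(_pick(COUNT, d, 'PEOPLE > Any People'))
--         else:
--             additions.append('PEOPLE > Any People')
--
--     seen = set()
--     out = []
--     for c in categories + additions:
--         if c not in seen:
--             seen.add(c)
--             out.append(c)
--     return out
-- ===== Notes on version B (the rewrite author's own statement) =====
-- stated objective: alternative
-- what changed: B accumulates all five category facts in one pass over the list (A rescans it with four any() calls plus a membership test), picks each section's category by filtering a keyword table and taking the head instead of A's if/elif chains, collects the additions separately and concatenates once instead of mutating in place, and dedups with an explicit seen-set loop instead of dict.fromkeys.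
import Mathlib
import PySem

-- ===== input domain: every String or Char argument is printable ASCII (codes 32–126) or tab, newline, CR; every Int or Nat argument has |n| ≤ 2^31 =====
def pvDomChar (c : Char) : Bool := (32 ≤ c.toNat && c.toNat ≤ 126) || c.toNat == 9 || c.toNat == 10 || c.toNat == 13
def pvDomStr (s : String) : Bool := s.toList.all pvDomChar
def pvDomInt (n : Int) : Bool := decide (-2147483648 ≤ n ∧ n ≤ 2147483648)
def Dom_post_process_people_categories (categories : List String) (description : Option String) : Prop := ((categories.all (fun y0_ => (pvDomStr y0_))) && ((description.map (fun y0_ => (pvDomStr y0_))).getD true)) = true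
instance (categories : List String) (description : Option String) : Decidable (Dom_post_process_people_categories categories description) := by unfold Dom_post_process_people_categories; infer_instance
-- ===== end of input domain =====

-- B accumulates all five category facts in ONE pass over the list (A rescans it
-- with four any() calls plus a membership test), picks each section's category by
-- filtering a keyword table and taking the head (A: if/elif chains), concatenates
-- the additions once, and dedups with an explicit seen-set loop (A: dict.fromkeys);
-- equivalence is about the RETURN value only (A appends to `categories` in place).

-- ===== PORT A =====
-- Literal transliteration of A: the four `any` scans, then the three if/elif
-- blocks (the first two reassign `description` to its lowercased form, modelled
-- by threading the (categories, description) pair), then dict.fromkeys dedup.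
def post_process_people_categories (categories : List String) (description : Option String) : List String :=
  let has_people := categories.any (fun cat => PySem.Str.startswith cat "PEOPLE >")
  let has_ethnicity := categories.any (fun cat => PySem.Str.isIn "Ethnicity >" cat)
  let has_age := categories.any (fun cat => PySem.Str.isIn "Age >" cat && !(PySem.Str.endswith cat "Any Age"))
  let has_people_count := categories.any (fun cat => ["PEOPLE > Any People > 2 People", "PEOPLE > Any People > 3+ People"].contains cat)
  let st1 : List String × Option String :=
    if has_people && !has_ethnicity && !(description.getD "" == "") then
      let d := PySem.Str.lower (description.getD "")
      let cats :=
        if PySem.Str.isIn "asian" d then categories ++ ["PEOPLE > Any Ethnicity > Asian"]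
        else if PySem.Str.isIn "black" d || PySem.Str.isIn "african" d then categories ++ ["PEOPLE > Any Ethnicity > Black / African American"]
        else if PySem.Str.isIn "hispanic" d || PySem.Str.isIn "latina" d || PySem.Str.isIn "latino" d then categories ++ ["PEOPLE > Any Ethnicity > Hispanic / Latina/o"]
        else if PySem.Str.isIn "indigenous" d || PySem.Str.isIn "native american" d then categories ++ ["PEOPLE > Any Ethnicity > Indigenous / Native American"]
        else if PySem.Str.isIn "white" d || PySem.Str.isIn "caucasian" d then categories ++ ["PEOPLE > Any Ethnicity > White / Caucasian"]
        else categories ++ ["PEOPLE > Any Ethnicity"]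
      (cats, some d)
    else (categories, description)
  let categories1 := st1.1
  let description1 := st1.2
  let st2 : List String × Option String :=
    if has_people && !has_age && !(description1.getD "" == "") then
      let d := PySem.Str.lower (description1.getD "")
      let cats :=
        if PySem.Str.isIn "child" d || PySem.Str.isIn "kid" d || PySem.Str.isIn "young" d || PySem.Str.isIn "teen" d then categories1 ++ ["PEOPLE > Any Age > < 20"]
        else if PySem.Str.isIn "20s" d || PySem.Str.isIn "twenties" d || PySem.Str.isIn "young adult" d then categories1 ++ ["PEOPLE > Any Age > 20s"]
        else if PySem.Str.isIn "30s" d || PySem.Str.isIn "thirties" d then categories1 ++ ["PEOPLE > Any Age > 30s"]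
        else if PySem.Str.isIn "40s" d || PySem.Str.isIn "forties" d then categories1 ++ ["PEOPLE > Any Age > 40s"]
        else if PySem.Str.isIn "50s" d || PySem.Str.isIn "fifties" d then categories1 ++ ["PEOPLE > Any Age > 50s"]
        else if PySem.Str.isIn "60" d || PySem.Str.isIn "sixties" d || PySem.Str.isIn "senior" d || PySem.Str.isIn "elderly" d then categories1 ++ ["PEOPLE > Any Age > 60+"]
        else categories1 ++ ["PEOPLE > Any Age"]
      (cats, some d)
    else (categories1, description1)
  let categories2 := st2.1
  let description2 := st2.2
  let categories3 :=
    if has_people && !has_people_count && !(categories2.contains "PEOPLE > No People") then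
      if !(description2.getD "" == "") &&
         (PySem.Str.isIn "people" (PySem.Str.lower (description2.getD "")) ||
          PySem.Str.isIn "persons" (PySem.Str.lower (description2.getD "")) ||
          PySem.Str.isIn "group" (PySem.Str.lower (description2.getD ""))) then
        if PySem.Str.isIn "three" (PySem.Str.lower (description2.getD "")) || PySem.Str.isIn "multiple" (PySem.Str.lower (description2.getD "")) || PySem.Str.isIn "group" (PySem.Str.lower (description2.getD "")) then
          categories2 ++ ["PEOPLE > Any People > 3+ People"]
        else if PySem.Str.isIn "two" (PySem.Str.lower (description2.getD "")) || PySem.Str.isIn "couple" (PySem.Str.lower (description2.getD "")) || PySem.Str.isIn "pair" (PySem.Str.lower (description2.getD "")) then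
          categories2 ++ ["PEOPLE > Any People > 2 People"]
        else categories2 ++ ["PEOPLE > Any People"]
      else categories2 ++ ["PEOPLE > Any People"]
    else categories2
  PySem.List.dedup categories3

-- ===== PORT B =====
def ppcEthnicityTable : List (List String × String) :=
  [ (["asian"], "PEOPLE > Any Ethnicity > Asian"),
    (["black", "african"], "PEOPLE > Any Ethnicity > Black / African American"),
    (["hispanic", "latina", "latino"], "PEOPLE > Any Ethnicity > Hispanic / Latina/o"),
    (["indigenous", "native american"], "PEOPLE > Any Ethnicity > Indigenous / Native American"),
    (["white", "caucasian"], "PEOPLE > Any Ethnicity > White / Caucasian") ]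

def ppcAgeTable : List (List String × String) :=
  [ (["child", "kid", "young", "teen"], "PEOPLE > Any Age > < 20"),
    (["20s", "twenties", "young adult"], "PEOPLE > Any Age > 20s"),
    (["30s", "thirties"], "PEOPLE > Any Age > 30s"),
    (["40s", "forties"], "PEOPLE > Any Age > 40s"),
    (["50s", "fifties"], "PEOPLE > Any Age > 50s"),
    (["60", "sixties", "senior", "elderly"], "PEOPLE > Any Age > 60+") ]

def ppcCountTable : List (List String × String) :=
  [ (["three", "multiple", "group"], "PEOPLE > Any People > 3+ People"),
    (["two", "couple", "pair"], "PEOPLE > Any People > 2 People") ]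

-- Source B's _pick: filter the matching rules, take the head, else the default
def ppcPick (table : List (List String × String)) (text dflt : String) : String :=
  match (table.filter (fun p => p.1.any (fun k => PySem.Str.isIn k text))).map Prod.snd with
  | [] => dflt
  | c :: _ => c

def post_process_people_categories_alt (categories : List String) (description : Option String) : List String :=
  let d := PySem.Str.lower (description.getD "")
  -- single pass over categories for all five facts
  let f := categories.foldl (fun f c =>
      (f.1 || PySem.Str.startswith c "PEOPLE >",
       f.2.1 || PySem.Str.isIn "Ethnicity >" c,
       f.2.2.1 || (PySem.Str.isIn "Age >" c && !(PySem.Str.endswith c "Any Age")),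
       f.2.2.2.1 || ["PEOPLE > Any People > 2 People", "PEOPLE > Any People > 3+ People"].contains c,
       f.2.2.2.2 || (c == "PEOPLE > No People")))
    ((false, false, false, false, false) : Bool × Bool × Bool × Bool × Bool)
  let people := f.1
  let ethnicity := f.2.1
  let age := f.2.2.1
  let count := f.2.2.2.1
  let no_people := f.2.2.2.2
  let additions : List String := []
  let additions := if people && !ethnicity && !(d == "") then additions ++ [ppcPick ppcEthnicityTable d "PEOPLE > Any Ethnicity"] else additions
  let additions := if people && !age && !(d == "") then additions ++ [ppcPick ppcAgeTable d "PEOPLE > Any Age"] else additions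
  let additions := if people && !count && !no_people then
      additions ++ [ if !(d == "") && (["people", "persons", "group"].any (fun w => PySem.Str.isIn w d))
                     then ppcPick ppcCountTable d "PEOPLE > Any People"
                     else "PEOPLE > Any People" ]
    else additions
  -- explicit seen-set dedup loop
  (categories ++ additions).foldl (fun out c => if out.contains c then out else out ++ [c]) []

-- ===== PRECONDITION & SPEC =====
def Spec_post_process_people_categories (categories : List String) (description : Option String) (out : List String) : Prop := out = post_process_people_categories_alt categories description
instance (categories : List String) (description : Option String) (out : List String) : Decidable (Spec_post_process_people_categories categories description out) := by unfold Spec_post_process_people_categories; infer_instance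

-- ===== CLAIM (what is proved, stated in full; the proofs are below) =====
def Claim_equal_post_process_people_categories : Prop := ∀ (categories : List String) (description : Option String), Dom_post_process_people_categories categories description → Spec_post_process_people_categories categories description (post_process_people_categories categories description)


-- ===== LEMMAS AND PROOFS =====

theorem ppcCharOfNat_toNat (n : Nat) (h : n < 55296) : (Char.ofNat n).toNat = n := by
  unfold Char.ofNat
  split
  · simp [Char.ofNatAux]
  · rename_i hv
    exact absurd (Or.inl h) hv

theorem ppcLowerChar_idem (c : Char) : PySem.Chars.lowerChar (PySem.Chars.lowerChar c) = PySem.Chars.lowerChar c := by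
  unfold PySem.Chars.lowerChar PySem.Chars.isupper
  split_ifs with h1 h2
  · exfalso
    simp only [Bool.and_eq_true, decide_eq_true_eq, Char.le_def, UInt32.le_iff_toNat_le] at h1 h2
    have e1 : 'A'.val.toNat = 65 := by decide
    have e2 : 'Z'.val.toNat = 90 := by decide
    have e3 : (Char.ofNat (c.toNat + 32)).val.toNat = (Char.ofNat (c.toNat + 32)).toNat := rfl
    have e4 : c.val.toNat = c.toNat := rfl
    rw [e1, e2, e4] at h1
    rw [e1, e2, e3] at h2
    have he : (Char.ofNat (c.toNat + 32)).toNat = c.toNat + 32 := ppcCharOfNat_toNat _ (by omega)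
    omega
  · rfl
  · rfl

theorem ppcLower_idem (s : String) : PySem.Str.lower (PySem.Str.lower s) = PySem.Str.lower s := by
  unfold PySem.Str.lower
  have h : (String.ofList (PySem.Chars.lower s.toList)).toList = PySem.Chars.lower s.toList := by
    simp
  rw [h]
  simp [PySem.Chars.lower, List.map_map, Function.comp_def, ppcLowerChar_idem]

theorem ppcLower_beq_empty (s : String) : (PySem.Str.lower s == "") = (s == "") := by
  rcases s with ⟨l⟩
  unfold PySem.Str.lower
  cases l <;> simp [PySem.Chars.lower]

-- the one-pass flag fold computes the four any-scans and the membership test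
theorem ppcFlags_go (cats : List String) (a b c d e : Bool) :
    cats.foldl (fun f c =>
      (f.1 || PySem.Str.startswith c "PEOPLE >",
       f.2.1 || PySem.Str.isIn "Ethnicity >" c,
       f.2.2.1 || (PySem.Str.isIn "Age >" c && !(PySem.Str.endswith c "Any Age")),
       f.2.2.2.1 || ["PEOPLE > Any People > 2 People", "PEOPLE > Any People > 3+ People"].contains c,
       f.2.2.2.2 || (c == "PEOPLE > No People"))) (a, b, c, d, e)
    = (a || cats.any (fun cat => PySem.Str.startswith cat "PEOPLE >"),
       b || cats.any (fun cat => PySem.Str.isIn "Ethnicity >" cat),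
       c || cats.any (fun cat => PySem.Str.isIn "Age >" cat && !(PySem.Str.endswith cat "Any Age")),
       d || cats.any (fun cat => ["PEOPLE > Any People > 2 People", "PEOPLE > Any People > 3+ People"].contains cat),
       e || cats.contains "PEOPLE > No People") := by
  induction cats generalizing a b c d e with
  | nil => simp
  | cons x xs ih =>
      rw [List.foldl_cons, ih]
      simp [List.any_cons, List.contains_cons, Bool.or_assoc, eq_comm, Bool.beq_eq_decide_eq,
        List.contains_eq_any_beq]

-- Source B's seen-set dedup loop is dict.fromkeys
theorem ppcDedup (l : List String) :
    l.foldl (fun out c => if out.contains c then out else out ++ [c]) [] = PySem.List.dedup l := rfl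

-- A's eth if/elif chain equals appending B's table pick
theorem ppcEthChain (cs : List String) (d : String) :
    (if PySem.Str.isIn "asian" d then cs ++ ["PEOPLE > Any Ethnicity > Asian"]
     else if PySem.Str.isIn "black" d || PySem.Str.isIn "african" d then cs ++ ["PEOPLE > Any Ethnicity > Black / African American"]
     else if PySem.Str.isIn "hispanic" d || PySem.Str.isIn "latina" d || PySem.Str.isIn "latino" d then cs ++ ["PEOPLE > Any Ethnicity > Hispanic / Latina/o"]
     else if PySem.Str.isIn "indigenous" d || PySem.Str.isIn "native american" d then cs ++ ["PEOPLE > Any Ethnicity > Indigenous / Native American"]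
     else if PySem.Str.isIn "white" d || PySem.Str.isIn "caucasian" d then cs ++ ["PEOPLE > Any Ethnicity > White / Caucasian"]
     else cs ++ ["PEOPLE > Any Ethnicity"])
    = cs ++ [ppcPick ppcEthnicityTable d "PEOPLE > Any Ethnicity"] := by
  simp only [ppcPick, ppcEthnicityTable, List.filter_cons, List.filter_nil, List.any_cons, List.any_nil, Bool.or_false, Bool.or_assoc]
  split_ifs <;> rfl

theorem ppcAgeChain (cs : List String) (d : String) :
    (if PySem.Str.isIn "child" d || PySem.Str.isIn "kid" d || PySem.Str.isIn "young" d || PySem.Str.isIn "teen" d then cs ++ ["PEOPLE > Any Age > < 20"]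
     else if PySem.Str.isIn "20s" d || PySem.Str.isIn "twenties" d || PySem.Str.isIn "young adult" d then cs ++ ["PEOPLE > Any Age > 20s"]
     else if PySem.Str.isIn "30s" d || PySem.Str.isIn "thirties" d then cs ++ ["PEOPLE > Any Age > 30s"]
     else if PySem.Str.isIn "40s" d || PySem.Str.isIn "forties" d then cs ++ ["PEOPLE > Any Age > 40s"]
     else if PySem.Str.isIn "50s" d || PySem.Str.isIn "fifties" d then cs ++ ["PEOPLE > Any Age > 50s"]
     else if PySem.Str.isIn "60" d || PySem.Str.isIn "sixties" d || PySem.Str.isIn "senior" d || PySem.Str.isIn "elderly" d then cs ++ ["PEOPLE > Any Age > 60+"]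
     else cs ++ ["PEOPLE > Any Age"])
    = cs ++ [ppcPick ppcAgeTable d "PEOPLE > Any Age"] := by
  simp only [ppcPick, ppcAgeTable, List.filter_cons, List.filter_nil, List.any_cons, List.any_nil, Bool.or_false, Bool.or_assoc]
  split_ifs <;> rfl

theorem ppcCountChain (cs : List String) (d : String) :
    (if PySem.Str.isIn "three" d || PySem.Str.isIn "multiple" d || PySem.Str.isIn "group" d then cs ++ ["PEOPLE > Any People > 3+ People"]
     else if PySem.Str.isIn "two" d || PySem.Str.isIn "couple" d || PySem.Str.isIn "pair" d then cs ++ ["PEOPLE > Any People > 2 People"]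
     else cs ++ ["PEOPLE > Any People"])
    = cs ++ [ppcPick ppcCountTable d "PEOPLE > Any People"] := by
  simp only [ppcPick, ppcCountTable, List.filter_cons, List.filter_nil, List.any_cons, List.any_nil, Bool.or_false, Bool.or_assoc]
  split_ifs <;> rfl

theorem ppcEth_ne_np (d : String) :
    (ppcPick ppcEthnicityTable d "PEOPLE > Any Ethnicity" == "PEOPLE > No People") = false := by
  simp only [ppcPick, ppcEthnicityTable, List.filter_cons, List.filter_nil, List.any_cons, List.any_nil, Bool.or_false]
  split_ifs <;> rfl

theorem ppcAge_ne_np (d : String) :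
    (ppcPick ppcAgeTable d "PEOPLE > Any Age" == "PEOPLE > No People") = false := by
  simp only [ppcPick, ppcAgeTable, List.filter_cons, List.filter_nil, List.any_cons, List.any_nil, Bool.or_false]
  split_ifs <;> rfl

theorem ppcContains_ne_append (l : List String) (x np : String) (h : (x == np) = false) :
    (l ++ [x]).contains np = l.contains np := by
  simp_all
  exact fun h' => absurd h'.symm h

theorem ppcAppend_ite (cs : List String) (c : Prop) [Decidable c] (x y : String) :
    (if c then cs ++ [x] else cs ++ [y]) = cs ++ [if c then x else y] := by
  split_ifs <;> rfl

theorem ppcIfAppend (cs : List String) (c : Prop) [Decidable c] (x y : List String) :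
    (if c then cs ++ x else cs ++ y) = cs ++ (if c then x else y) := by
  split_ifs <;> rfl

theorem ppcIfAppendNil (cs : List String) (c : Prop) [Decidable c] (x : List String) :
    (if c then cs ++ x else cs) = cs ++ (if c then x else []) := by
  split_ifs <;> simp

theorem ppcIteSingleton (c : Prop) [Decidable c] (x y : String) :
    (if c then ([x] : List String) else [y]) = [if c then x else y] := by
  split_ifs <;> rfl

-- ===== VERDICT (by name: the statement is the Claim_ definition above) =====
theorem post_process_people_categories_spec : Claim_equal_post_process_people_categories := by
  intro cats desc _
  unfold Spec_post_process_people_categories post_process_people_categories post_process_people_categories_alt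
  simp only [ppcFlags_go, Bool.false_or, ppcLower_beq_empty, ppcDedup, List.any_cons, List.any_nil, Bool.or_false]
  by_cases h1 : (cats.any (fun cat => PySem.Str.startswith cat "PEOPLE >") &&
      !cats.any (fun cat => PySem.Str.isIn "Ethnicity >" cat) &&
      !(desc.getD "" == "")) = true
  all_goals
    simp only [h1, Bool.false_eq_true, if_true, if_false, Option.getD_some,
      ppcLower_beq_empty, ppcLower_idem]
  all_goals
    by_cases h2 : (cats.any (fun cat => PySem.Str.startswith cat "PEOPLE >") &&
        !cats.any (fun cat => PySem.Str.isIn "Age >" cat && !(PySem.Str.endswith cat "Any Age")) &&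
        !(desc.getD "" == "")) = true
  all_goals
    simp only [h2, Bool.false_eq_true, if_true, if_false, Option.getD_some,
      ppcLower_beq_empty, ppcLower_idem,
      ppcEthChain, ppcAgeChain, ppcCountChain,
      ppcContains_ne_append _ _ _ (ppcEth_ne_np _), ppcContains_ne_append _ _ _ (ppcAge_ne_np _)]
  all_goals
    simp only [ppcAppend_ite, List.append_assoc, List.nil_append, List.append_nil]
  all_goals
    simp only [ppcIfAppend, ppcIfAppendNil, ppcIteSingleton]
  all_goals simp only [Bool.or_assoc]
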